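-- pv_equiv track=rewrite | github.com/Rayan088/Data-Structures-and-Algorithms | Projects/Plagiarism_Checker/src/analysis.py | top_matching_phrase
-- ===== SOURCE A (Python) =====
-- from collections import Counter
--
-- def top_matching_phrase(k_grams1, k_grams2):
--     counter1 = Counter(k_grams1)
--     counter2 = Counter(k_grams2)
--
--     common_words = []
--
--     for word in counter1:
--         if word in counter2:
--             common_words.extend([word] * min(counter1[word], counter2[word]))
--     #Finds common words in both passages
--
--     frequency_count = {}
--
--     for element in common_words:
--         if element in frequency_count:
--             frequency_count[element] += 1
--         else:
--             frequency_count[element] = 1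
--     #Counting frequency of common words
--
--     most_common_word = None
--     max_frequency = 0
--
--     for word, frequency in frequency_count.items():
--         if frequency > max_frequency:
--             max_frequency = frequency
--             most_common_word = word
--     #Finding the maximum frequency of the most common word
--
--     if most_common_word != None:
--         return f"Most common word: {most_common_word} (appears {max_frequency} times)"
--     else:
--         return f"No matching words found"
-- ===== SOURCE B (Python) =====
-- from collections import Counter
--
-- def top_matching_phrase(k_grams1, k_grams2):
--     counter1 = Counter(k_grams1)
--     counter2 = Counter(k_grams2)
--
--     best_word = None
--     best_count = 0
--     for word, c1 in counter1.items():
--         m = min(c1, counter2.get(word, 0))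
--         if m > best_count:
--             best_count = m
--             best_word = word
--
--     if best_word is None:
--         return f"No matching words found"
--     return f"Most common word: {best_word} (appears {best_count} times)"
-- ===== Notes on version B (the rewrite author's own statement) =====
-- stated objective: simpler
-- what changed: B computes the answer in one pass over counter1, taking min(c1, counter2.get(word,0)) per word, instead of A's three loops that materialize a common_words list of min-count copies and then re-count it into a frequency dict before scanning for the max.
import Mathlib
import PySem

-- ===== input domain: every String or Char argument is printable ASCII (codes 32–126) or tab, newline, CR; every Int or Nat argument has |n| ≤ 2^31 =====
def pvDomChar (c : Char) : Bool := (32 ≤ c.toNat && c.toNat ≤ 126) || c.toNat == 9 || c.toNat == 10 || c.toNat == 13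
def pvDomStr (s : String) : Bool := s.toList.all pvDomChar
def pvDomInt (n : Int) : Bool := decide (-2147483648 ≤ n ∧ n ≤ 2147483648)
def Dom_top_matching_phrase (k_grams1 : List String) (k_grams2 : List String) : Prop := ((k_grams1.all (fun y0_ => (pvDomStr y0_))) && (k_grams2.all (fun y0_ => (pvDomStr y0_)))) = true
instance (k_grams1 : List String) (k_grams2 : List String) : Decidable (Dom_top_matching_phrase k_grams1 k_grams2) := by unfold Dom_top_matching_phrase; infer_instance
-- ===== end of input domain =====

-- B replaces A's three loops (materialize min-count copies of each common word into a list,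
-- re-count that list into a dict, scan the dict for the max) by a single max-scan over counter1 ('simpler').

-- ===== PORT A =====
def top_matching_phrase (k_grams1 : List String) (k_grams2 : List String) : String :=
  let counter1 := PySem.Dict.counter k_grams1
  let counter2 := PySem.Dict.counter k_grams2
  let common_words := counter1.keys.foldl (fun acc word =>
      if counter2.contains word then
        acc ++ List.replicate (min (counter1.getD word 0) (counter2.getD word 0)).toNat word
      else acc) []
  let frequency_count := common_words.foldl (fun d element =>
      if d.contains element then d.modify element 0 (· + 1) else d.insert element 1)
      (PySem.Dict.empty : PySem.Dict String Int)
  let r := frequency_count.items.foldl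
      (fun (st : Option String × Int) wf => if wf.2 > st.2 then (some wf.1, wf.2) else st)
      ((none, 0) : Option String × Int)
  match r.1 with
  | some w => "Most common word: " ++ w ++ " (appears " ++ PySem.Int.toStr r.2 ++ " times)"
  | none => "No matching words found"

-- ===== PORT B =====
def top_matching_phrase_alt (k_grams1 : List String) (k_grams2 : List String) : String :=
  let counter1 := PySem.Dict.counter k_grams1
  let counter2 := PySem.Dict.counter k_grams2
  let r := counter1.items.foldl
      (fun (st : Option String × Int) wc =>
        let m := min wc.2 (counter2.getD wc.1 0)
        if m > st.2 then (some wc.1, m) else st)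
      ((none, 0) : Option String × Int)
  match r.1 with
  | some w => "Most common word: " ++ w ++ " (appears " ++ PySem.Int.toStr r.2 ++ " times)"
  | none => "No matching words found"

-- ===== PRECONDITION & SPEC =====
def Spec_top_matching_phrase (k_grams1 : List String) (k_grams2 : List String) (out : String) : Prop := out = top_matching_phrase_alt k_grams1 k_grams2
instance (k_grams1 : List String) (k_grams2 : List String) (out : String) : Decidable (Spec_top_matching_phrase k_grams1 k_grams2 out) := by unfold Spec_top_matching_phrase; infer_instance

-- ===== CLAIM (what is proved, stated in full; the proofs are below) =====
def Claim_equal_top_matching_phrase : Prop := ∀ (k_grams1 : List String) (k_grams2 : List String), Dom_top_matching_phrase k_grams1 k_grams2 → Spec_top_matching_phrase k_grams1 k_grams2 (top_matching_phrase k_grams1 k_grams2)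

-- ===== LEMMAS AND PROOFS =====

-- per-word number of copies A puts into common_words (a Nat) …
def pvJ (k_grams1 k_grams2 : List String) (w : String) : Nat :=
  if k_grams2.contains w then (min ((k_grams1.count w : Int)) ((k_grams2.count w : Int))).toNat else 0

-- … and B's per-word min value (an Int); they agree via pv_J_eq_M
def pvM (k_grams1 k_grams2 : List String) (w : String) : Int :=
  min ((k_grams1.count w : Int)) ((k_grams2.count w : Int))

theorem pv_J_eq_M (k1 k2 : List String) (w : String) :
    ((pvJ k1 k2 w : Nat) : Int) = pvM k1 k2 w := by
  unfold pvJ pvM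
  by_cases h : k2.contains w
  · simp only [h, if_true]
    exact Int.toNat_of_nonneg (le_min (Int.natCast_nonneg _) (Int.natCast_nonneg _))
  · have h0 : k2.count w = 0 := by
      simp at h; exact List.count_eq_zero.mpr h
    simp [h0]

theorem pv_ofList_replicate (x : String) (n : Nat) :
    PySem.Set.ofList (List.replicate n x) = if n = 0 then [] else [x] := by
  induction n with
  | zero => simp
  | succ n ih =>
    rw [List.replicate_succ, PySem.Set.ofList_cons, ih]
    by_cases h : n = 0 <;> simp [h, PySem.Set.discard]

theorem pv_count_flat_zero (J : String → Nat) (l : List String) (w : String) (hw : w ∉ l) :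
    (l.flatMap (fun u => List.replicate (J u) u)).count w = 0 := by
  induction l with
  | nil => rfl
  | cons x l ih =>
    simp only [List.flatMap_cons, List.count_append]
    have hx : x ≠ w := by intro h; exact hw (h ▸ List.mem_cons_self)
    rw [List.count_replicate, ih (fun h => hw (List.mem_cons_of_mem _ h))]
    simp [hx]

theorem pv_count_flat (J : String → Nat) (l : List String) (hl : l.Nodup) (w : String) (hw : w ∈ l) :
    (l.flatMap (fun u => List.replicate (J u) u)).count w = J w := by
  induction l with
  | nil => cases hw
  | cons x l ih =>
    simp only [List.flatMap_cons, List.count_append]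
    rcases List.mem_cons.mp hw with h | h
    · subst h
      rw [List.count_replicate_self, pv_count_flat_zero J l w (List.nodup_cons.mp hl).1]
      omega
    · have hx : x ≠ w := by
        intro he; exact (List.nodup_cons.mp hl).1 (he ▸ h)
      rw [List.count_replicate, ih (List.nodup_cons.mp hl).2 h]
      simp [hx]

-- set() of a concatenation of replicate-blocks over distinct words = the words with a nonempty block
theorem pv_ofList_flat (J : String → Nat) (l : List String) (hl : l.Nodup) :
    PySem.Set.ofList (l.flatMap (fun u => List.replicate (J u) u)) = l.filter (fun u => J u != 0) := by
  induction l with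
  | nil => rfl
  | cons x l ih =>
    obtain ⟨hx, hl'⟩ := List.nodup_cons.mp hl
    simp only [List.flatMap_cons]
    rw [PySem.Set.ofList_append, pv_ofList_replicate]
    by_cases h : J x = 0
    · rw [if_pos h, PySem.Set.update_nil_left, ih hl']
      simp [h]
    · rw [if_neg h, PySem.Set.update_eq_append_filter, ih hl']
      have : List.filter (fun y => !PySem.Set.contains [x] y) (List.filter (fun u => J u != 0) l)
           = List.filter (fun u => J u != 0) l := by
        rw [List.filter_eq_self]
        intro a ha
        have : a ∈ l := (List.mem_filter.mp ha).1
        have : a ≠ x := fun he => hx (he ▸ this)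
        simp [PySem.Set.contains, this]
      rw [this, List.filter_cons]
      simp [h]

-- A's first loop builds common_words as a flatMap of replicate-blocks over counter1's keys
theorem pv_common_eq (k1 k2 : List String) :
    (PySem.Dict.counter k1).keys.foldl (fun acc word =>
      if (PySem.Dict.counter k2).contains word then
        acc ++ List.replicate (min ((PySem.Dict.counter k1).getD word 0) ((PySem.Dict.counter k2).getD word 0)).toNat word
      else acc) []
    = (PySem.Set.ofList k1).flatMap (fun u => List.replicate (pvJ k1 k2 u) u) := by
  rw [PySem.Dict.keys_counter]
  rw [PySem.List.foldl_congr_mem _ _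
      (fun acc u => acc ++ List.replicate (pvJ k1 k2 u) u) _ ?_]
  · rw [PySem.List.foldl_append_eq_flatMap]; rfl
  · intro acc x hx
    simp only [PySem.Dict.contains_counter, PySem.Dict.getD_counter, pvJ]
    by_cases h : x ∈ k2 <;> simp [h]

-- A's second loop (branchy increment-or-insert) is exactly Counter
theorem pv_freq_eq (cw : List String) :
    cw.foldl (fun d element =>
      if d.contains element then d.modify element 0 (· + 1) else d.insert element 1)
      (PySem.Dict.empty : PySem.Dict String Int)
    = PySem.Dict.counter cw := by
  rw [PySem.Dict.counter_eq_foldl]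
  apply PySem.List.foldl_congr_mem
  intro d x _
  by_cases h : d.contains x
  · simp [h]
  · have h' : d.contains x = false := by simpa using h
    simp [h', PySem.Dict.modify, PySem.Dict.getD_of_not_contains _ _ h']

-- the two max-scans agree: words with min-count 0 never beat a nonnegative running max
theorem pv_scan (k1 k2 : List String) (l : List String) (st : Option String × Int) (hst : 0 ≤ st.2) :
    ((l.filter (fun u => pvJ k1 k2 u != 0)).map (fun w => (w, pvM k1 k2 w))).foldl
      (fun (st : Option String × Int) wf => if wf.2 > st.2 then (some wf.1, wf.2) else st) st
    = (l.map (fun w => (w, ((k1.count w : Nat) : Int)))).foldl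
      (fun (st : Option String × Int) wc =>
        let m := min wc.2 ((k2.count wc.1 : Nat) : Int)
        if m > st.2 then (some wc.1, m) else st) st := by
  induction l generalizing st with
  | nil => rfl
  | cons x l ih =>
    simp only [List.map_cons, List.foldl_cons, List.filter_cons]
    by_cases h : pvJ k1 k2 x != 0
    · rw [if_pos h]
      simp only [List.map_cons, List.foldl_cons]
      have hm : pvM k1 k2 x = min ((k1.count x : Nat) : Int) ((k2.count x : Nat) : Int) := rfl
      by_cases hgt : pvM k1 k2 x > st.2
      · rw [if_pos hgt, ← hm, if_pos hgt]
        exact ih _ (le_of_lt (lt_of_le_of_lt hst hgt))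
      · rw [if_neg hgt, ← hm, if_neg hgt]
        exact ih _ hst
    · rw [if_neg h]
      have h0 : pvM k1 k2 x = 0 := by
        have := pv_J_eq_M k1 k2 x
        simp at h
        omega
      have : ¬ (min ((k1.count x : Nat) : Int) ((k2.count x : Nat) : Int) > st.2) := by
        rw [show min ((k1.count x : Nat) : Int) ((k2.count x : Nat) : Int) = pvM k1 k2 x from rfl, h0]
        omega
      simp only [if_neg this]
      exact ih _ hst

-- ===== VERDICT (by name: the statement is the Claim_ definition above) =====
theorem top_matching_phrase_spec : Claim_equal_top_matching_phrase := by
  intro k1 k2 _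
  show top_matching_phrase k1 k2 = top_matching_phrase_alt k1 k2
  unfold top_matching_phrase top_matching_phrase_alt
  simp only [pv_common_eq, pv_freq_eq]
  simp only [PySem.Dict.items_counter, PySem.Dict.getD_counter]
  rw [pv_ofList_flat (pvJ k1 k2) (PySem.Set.ofList k1) (PySem.Set.nodup_ofList k1)]
  rw [List.map_congr_left (l := (PySem.Set.ofList k1).filter (fun u => pvJ k1 k2 u != 0))
      (g := fun w => (w, pvM k1 k2 w)) ?_]
  · rw [pv_scan k1 k2 (PySem.Set.ofList k1) ((none, 0) : Option String × Int) (by norm_num)]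
  · intro w hw
    have hmem : w ∈ PySem.Set.ofList k1 := (List.mem_filter.mp hw).1
    rw [pv_count_flat (pvJ k1 k2) (PySem.Set.ofList k1) (PySem.Set.nodup_ofList k1) w hmem,
        pv_J_eq_M]
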